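-- pv_equiv track=rewrite | github.com/otoTree/human-text | dsl_compiler/llm_augmentor.py | _extract_dsl_code
-- ===== SOURCE A (Python) =====
-- def _extract_dsl_code(response: str) -> str:
--     """Extract DSL code from LLM response"""
--     response = response.strip()
--
--     # If response contains code block markers, extract content within them
--     if "```" in response:
--         lines = response.split('\n')
--         in_code_block = False
--         code_lines = []
--
--         for line in lines:
--             if line.strip().startswith('```'):
--                 in_code_block = not in_code_block
--                 continue
--             if in_code_block:
--                 code_lines.append(line)
--
--         if code_lines:
--             return '\n'.join(code_lines)
--
--     # If no code block markers, look for lines starting with @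
--     lines = response.split('\n')
--     dsl_lines = []
--     found_dsl = False
--
--     for line in lines:
--         # Skip empty lines and explanatory text until DSL code is found
--         if line.strip().startswith('@') or found_dsl:
--             found_dsl = True
--             dsl_lines.append(line)
--         elif found_dsl and line.strip() and not line.strip().startswith('#'):
--             # If already in DSL code, continue adding non-comment lines
--             dsl_lines.append(line)
--
--     if dsl_lines:
--         return '\n'.join(dsl_lines)
--
--     # If nothing found, return original response
--     return response
-- ===== SOURCE B (Python) =====
-- def _extract_dsl_code(response: str) -> str:
--     """Extract DSL code from LLM response"""
--     response = response.strip()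
--
--     if "```" in response:
--         # Split the lines into segments delimited by whole-line ``` fences;
--         # the fenced blocks' contents are the odd-numbered segments.
--         segments = []
--         cur = []
--         for line in response.split('\n'):
--             if line.strip().startswith('```'):
--                 segments.append(cur)
--                 cur = []
--             else:
--                 cur.append(line)
--         segments.append(cur)
--         code_lines = [l for i, seg in enumerate(segments) if i % 2 == 1 for l in seg]
--         if code_lines:
--             return '\n'.join(code_lines)
--
--     # No (non-empty) fenced code: take everything from the first '@' line on.
--     lines = response.split('\n')
--     for i, line in enumerate(lines):
--         if line.strip().startswith('@'):
--             return '\n'.join(lines[i:])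
--     return response
-- ===== Notes on version B (the rewrite author's own statement) =====
-- stated objective: simpler
-- what changed: Phase 1 splits the lines into fence-delimited segments and flattens the odd-numbered segments instead of A's per-line in/out toggle flag; phase 2 finds the index of the first '@' line and joins the tail slice, dropping A's sticky-flag accumulator and its dead elif branch.
import Mathlib
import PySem

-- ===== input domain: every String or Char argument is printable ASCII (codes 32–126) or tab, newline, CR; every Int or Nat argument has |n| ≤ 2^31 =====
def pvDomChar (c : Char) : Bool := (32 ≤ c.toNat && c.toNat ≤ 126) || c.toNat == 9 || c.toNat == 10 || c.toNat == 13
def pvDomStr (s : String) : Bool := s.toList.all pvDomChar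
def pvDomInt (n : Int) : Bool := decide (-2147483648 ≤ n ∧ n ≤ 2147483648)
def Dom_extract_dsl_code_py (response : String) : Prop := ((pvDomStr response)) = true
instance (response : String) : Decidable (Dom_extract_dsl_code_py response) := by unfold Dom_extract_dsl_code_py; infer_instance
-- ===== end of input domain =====

-- B replaces A's per-line toggle flag (phase 1) with fence-delimited segments whose
-- odd-numbered ones are flattened, and A's sticky-flag scan (phase 2, dead elif included)
-- with "index of first '@' line, then join the tail slice" — simpler decomposition, same values.

-- ===== PORT A =====
def extract_dsl_code_py (response : String) : String :=
  let response := PySem.Str.strip response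
  let phase2 :=
    let lines := (PySem.Str.split? response "
").getD []  -- sep "\n" ≠ "": split? is some
    let st := lines.foldl (fun (st : List String × Bool) line =>
      if PySem.Str.startswith (PySem.Str.strip line) "@" || st.2 then
        (st.1 ++ [line], true)
      else if st.2 && !(PySem.Str.strip line == "") &&
              !(PySem.Str.startswith (PySem.Str.strip line) "#") then
        (st.1 ++ [line], st.2)
      else st) ([], false)
    if st.1 ≠ [] then PySem.Str.join "\n" st.1 else response
  if PySem.Str.isIn "```" response then
    let lines := (PySem.Str.split? response "
").getD []  -- sep "\n" ≠ "": split? is some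
    let st := lines.foldl (fun (st : List String × Bool) line =>
      if PySem.Str.startswith (PySem.Str.strip line) "```" then (st.1, !st.2)
      else if st.2 then (st.1 ++ [line], st.2) else st) ([], false)
    if st.1 ≠ [] then PySem.Str.join "\n" st.1 else phase2
  else phase2

-- ===== PORT B =====
def extract_dsl_code_py_alt (response : String) : String :=
  let response := PySem.Str.strip response
  let phase2 :=
    let lines := (PySem.Str.split? response "
").getD []  -- sep "\n" ≠ "": split? is some
    match (PySem.List.enumerate lines).find?
        (fun p => PySem.Str.startswith (PySem.Str.strip p.2) "@") with
    | some p => PySem.Str.join "\n" (PySem.List.slice lines (some p.1) none)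
    | none => response
  if PySem.Str.isIn "```" response then
    let st := ((PySem.Str.split? response "\n").getD []).foldl
      (fun (st : List (List String) × List String) line =>
        if PySem.Str.startswith (PySem.Str.strip line) "```" then (st.1 ++ [st.2], [])
        else (st.1, st.2 ++ [line])) ([], [])
    let segments := st.1 ++ [st.2]
    let code_lines := (PySem.List.enumerate segments).flatMap
      (fun p => if PySem.Int.mod p.1 2 == 1 then p.2 else [])
    if code_lines ≠ [] then PySem.Str.join "\n" code_lines else phase2
  else phase2

-- ===== PRECONDITION & SPEC =====
def Spec_extract_dsl_code_py (response : String) (out : String) : Prop := out = extract_dsl_code_py_alt response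
instance (response : String) (out : String) : Decidable (Spec_extract_dsl_code_py response out) := by unfold Spec_extract_dsl_code_py; infer_instance

-- ===== CLAIM (what is proved, stated in full; the proofs are below) =====
def Claim_equal_extract_dsl_code_py : Prop := ∀ (response : String), Dom_extract_dsl_code_py response → Spec_extract_dsl_code_py response (extract_dsl_code_py response)

-- ===== LEMMAS AND PROOFS =====

-- fence / '@' line tests
def pvFenceP (line : String) : Bool := PySem.Str.startswith (PySem.Str.strip line) "```"
def pvAtP (line : String) : Bool := PySem.Str.startswith (PySem.Str.strip line) "@"

-- A's phase-1 toggle step and B's phase-1 segment step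
def pvGA (st : List String × Bool) (line : String) : List String × Bool :=
  if pvFenceP line then (st.1, !st.2)
  else if st.2 then (st.1 ++ [line], st.2) else st

def pvGB (st : List (List String) × List String) (line : String) : List (List String) × List String :=
  if pvFenceP line then (st.1 ++ [st.2], []) else (st.1, st.2 ++ [line])

def pvOddFlat (segs : List (List String)) : List String :=
  (PySem.List.enumerate segs).flatMap (fun p => if PySem.Int.mod p.1 2 == 1 then p.2 else [])

-- A's phase-2 step (with the dead elif)
def pvHA (st : List String × Bool) (line : String) : List String × Bool :=
  if pvAtP line || st.2 then (st.1 ++ [line], true)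
  else if st.2 && !(PySem.Str.strip line == "") &&
          !(PySem.Str.startswith (PySem.Str.strip line) "#") then
    (st.1 ++ [line], st.2)
  else st

theorem pvOddFlat_nil : pvOddFlat [] = [] := rfl

theorem pvMod2 (n : Nat) : (PySem.Int.mod (n : Int) 2 == 1) = (n % 2 == 1) := by
  rw [PySem.Int.mod_eq_emod_of_pos (by omega)]
  rcases Nat.mod_two_eq_zero_or_one n with h | h
  · have h1 : (n : Int) % 2 = 0 := by omega
    simp [h1, h]
  · have h1 : (n : Int) % 2 = 1 := by omega
    simp [h1, h]

theorem pvOddFlat_append (segs : List (List String)) (cur : List String) :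
    pvOddFlat (segs ++ [cur]) =
      pvOddFlat segs ++ (if segs.length % 2 == 1 then cur else []) := by
  unfold pvOddFlat
  rw [PySem.List.enumerate_append]
  simp only [List.flatMap_append, PySem.List.enumerate_cons, PySem.List.enumerate_nil,
    List.flatMap_cons, List.flatMap_nil, List.append_nil]
  congr 1
  rw [show (0 : Int) + segs.length = (segs.length : Int) by omega, pvMod2]

theorem pvPhase1_inv (lines : List String) :
    ∀ (segs : List (List String)) (cur acc : List String) (b : Bool),
      b = (segs.length % 2 == 1) →
      acc = pvOddFlat segs ++ (if b then cur else []) →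
      (lines.foldl pvGA (acc, b)).1 =
        pvOddFlat ((lines.foldl pvGB (segs, cur)).1 ++ [(lines.foldl pvGB (segs, cur)).2]) := by
  induction lines with
  | nil =>
    intro segs cur acc b hb hacc
    simp only [List.foldl_nil, pvOddFlat_append, hacc, ← hb]
  | cons l ls ih =>
    intro segs cur acc b hb hacc
    simp only [List.foldl_cons]
    by_cases hf : pvFenceP l
    · have hA : pvGA (acc, b) l = (acc, !b) := by simp [pvGA, hf]
      have hB : pvGB (segs, cur) l = (segs ++ [cur], []) := by simp [pvGB, hf]
      rw [hA, hB]
      apply ih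
      · simp only [List.length_append, List.length_cons, List.length_nil]
        rw [hb]
        rcases Nat.mod_two_eq_zero_or_one segs.length with h | h
        · have h2 : (segs.length + 1) % 2 = 1 := by omega
          simp [h, h2]
        · have h2 : (segs.length + 1) % 2 = 0 := by omega
          simp [h, h2]
      · rw [pvOddFlat_append, hacc, ← hb]
        cases b <;> simp
    · cases b with
      | true =>
        have hA : pvGA (acc, true) l = (acc ++ [l], true) := by simp [pvGA, hf]
        have hB : pvGB (segs, cur) l = (segs, cur ++ [l]) := by simp [pvGB, hf]
        rw [hA, hB]
        apply ih _ _ _ _ hb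
        simp [hacc]
      | false =>
        have hA : pvGA (acc, false) l = (acc, false) := by simp [pvGA, hf]
        have hB : pvGB (segs, cur) l = (segs, cur ++ [l]) := by simp [pvGB, hf]
        rw [hA, hB]
        exact ih _ _ _ _ hb (by simpa using hacc)

-- pvHA's elif is dead: it needs st.2 both false (to be reached) and true (to fire)
theorem pvHA_eq (st : List String × Bool) (line : String) :
    pvHA st line = if pvAtP line || st.2 then (st.1 ++ [line], true) else st := by
  unfold pvHA
  by_cases h2 : st.2 <;> by_cases ha : pvAtP line <;> simp [h2, ha]

theorem pvHA_sticky (lines : List String) :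
    ∀ acc : List String, lines.foldl pvHA (acc, true) = (acc ++ lines, true) := by
  induction lines with
  | nil => intro acc; simp
  | cons l ls ih =>
    intro acc
    have h1 : pvHA (acc, true) l = (acc ++ [l], true) := by simp [pvHA_eq]
    rw [List.foldl_cons, h1, ih]; simp

theorem pvFoldl_hA (lines : List String) :
    (lines.foldl pvHA ([], false)).1 =
      match lines.findIdx? pvAtP with
      | some i => lines.drop i
      | none => [] := by
  induction lines with
  | nil => simp
  | cons l ls ih =>
    by_cases ha : pvAtP l
    · have h1 : pvHA ([], false) l = ([l], true) := by simp [pvHA_eq, ha]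
      rw [List.foldl_cons, h1, pvHA_sticky, List.findIdx?_cons, if_pos ha]
      simp
    · have h1 : pvHA ([], false) l = ([], false) := by simp [pvHA_eq, ha]
      rw [List.foldl_cons, h1, ih, List.findIdx?_cons, if_neg ha]
      cases h : ls.findIdx? pvAtP <;> simp

theorem pvEnum_find_fst (lines : List String) :
    ∀ s : Int,
      ((PySem.List.enumerate lines s).find?
          (fun p => PySem.Str.startswith (PySem.Str.strip p.2) "@")).map (·.1)
        = (lines.findIdx? pvAtP).map (fun i => s + i) := by
  induction lines with
  | nil => intro s; simp [PySem.List.enumerate_nil]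
  | cons l ls ih =>
    intro s
    rw [PySem.List.enumerate_cons]
    by_cases ha : pvAtP l
    · rw [List.find?_cons_of_pos (by simpa [pvAtP] using ha), List.findIdx?_cons, if_pos ha]
      simp
    · rw [List.find?_cons_of_neg (by simpa [pvAtP] using ha), List.findIdx?_cons, if_neg ha,
        ih (s + 1)]
      cases h : ls.findIdx? pvAtP <;> simp <;> omega

theorem pvFindIdx_lt (lines : List String) (i : Nat) (h : lines.findIdx? pvAtP = some i) :
    i < lines.length := by rcases List.findIdx?_eq_some_iff_getElem.mp h with ⟨hlt, _⟩; exact hlt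

-- phase 2 of A equals phase 2 of B
theorem pvPhase2_eq (lines : List String) (response : String) :
    (if (lines.foldl pvHA ([], false)).1 ≠ [] then
        PySem.Str.join "\n" (lines.foldl pvHA ([], false)).1 else response)
      = (match (PySem.List.enumerate lines).find?
            (fun p => PySem.Str.startswith (PySem.Str.strip p.2) "@") with
        | some p => PySem.Str.join "\n" (PySem.List.slice lines (some p.1) none)
        | none => response) := by
  have hf := pvEnum_find_fst lines 0
  rw [pvFoldl_hA]
  cases hidx : lines.findIdx? pvAtP with
  | none =>
    rw [hidx] at hf
    have hf2 : (PySem.List.enumerate lines 0).find?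
        (fun p => PySem.Str.startswith (PySem.Str.strip p.2) "@") = none := by
      simpa using hf
    rw [hf2]
    simp
  | some i =>
    rw [hidx] at hf
    cases hfind : (PySem.List.enumerate lines 0).find?
        (fun p => PySem.Str.startswith (PySem.Str.strip p.2) "@") with
    | none => rw [hfind] at hf; simp at hf
    | some p =>
      rw [hfind] at hf
      have hp : p.1 = (i : Int) := by simpa using hf
      have hlt : i < lines.length := pvFindIdx_lt lines i hidx
      have hne : lines.drop i ≠ [] := by
        simp only [ne_eq, List.drop_eq_nil_iff]; omega
      simp [hp, PySem.List.slice_from_natCast, hne]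

-- ===== VERDICT (by name: the statement is the Claim_ definition above) =====
theorem extract_dsl_code_py_spec : Claim_equal_extract_dsl_code_py := by
  intro response _
  unfold Spec_extract_dsl_code_py extract_dsl_code_py extract_dsl_code_py_alt
  simp only []
  set r := PySem.Str.strip response with hr
  set lines := (PySem.Str.split? r "\n").getD [] with hl
  have hGA : (fun (st : List String × Bool) line =>
      if PySem.Str.startswith (PySem.Str.strip line) "```" then (st.1, !st.2)
      else if st.2 then (st.1 ++ [line], st.2) else st) = pvGA := rfl
  have hGB : (fun (st : List (List String) × List String) line =>
      if PySem.Str.startswith (PySem.Str.strip line) "```" then (st.1 ++ [st.2], [])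
      else (st.1, st.2 ++ [line])) = pvGB := rfl
  have hHA : (fun (st : List String × Bool) line =>
      if PySem.Str.startswith (PySem.Str.strip line) "@" || st.2 then
        (st.1 ++ [line], true)
      else if st.2 && !(PySem.Str.strip line == "") &&
              !(PySem.Str.startswith (PySem.Str.strip line) "#") then
        (st.1 ++ [line], st.2)
      else st) = pvHA := rfl
  rw [hGA, hGB, hHA]
  have hph2 := pvPhase2_eq lines r
  have hph1 : (lines.foldl pvGA ([], false)).1 =
      pvOddFlat ((lines.foldl pvGB ([], [])).1 ++ [(lines.foldl pvGB ([], [])).2]) :=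
    pvPhase1_inv lines [] [] [] false (by simp) (by simp [pvOddFlat_nil])
  have hof : pvOddFlat ((lines.foldl pvGB ([], [])).1 ++ [(lines.foldl pvGB ([], [])).2]) =
      (PySem.List.enumerate ((lines.foldl pvGB ([], [])).1 ++ [(lines.foldl pvGB ([], [])).2])).flatMap
        (fun p => if PySem.Int.mod p.1 2 == 1 then p.2 else []) := rfl
  by_cases hin : PySem.Str.isIn "```" r
  · rw [if_pos hin, if_pos hin, ← hof, ← hph1, hph2]
  · rw [if_neg hin, if_neg hin, hph2]
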